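-- pv_equiv track=rewrite | github.com/hendrikhuwy-lgtm/Investment-Sample | backend/app/services/mcp_client.py | _host_matches_no_proxy
-- ===== SOURCE A (Python) =====
-- def _host_matches_no_proxy(host: str, no_proxy: str) -> bool:
--     entries = [item.strip().lower() for item in no_proxy.split(",") if item.strip()]
--     host_lower = host.lower()
--     for entry in entries:
--         if entry == "*":
--             return True
--         if host_lower == entry:
--             return True
--         if host_lower.endswith(f".{entry}"):
--             return True
--     return False
-- ===== SOURCE B (Python) =====
-- def _host_matches_no_proxy(host: str, no_proxy: str) -> bool:
--     hl = host.lower()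
--     cands = {hl}
--     for i, ch in enumerate(hl):
--         if ch == '.':
--             cands.add(hl[i + 1:])
--     for item in no_proxy.split(","):
--         e = item.strip().lower()
--         if e and (e == "*" or e in cands):
--             return True
--     return False
-- ===== Notes on version B (the rewrite author's own statement) =====
-- stated objective: alternative
-- what changed: B precomputes the set of the host's dot-boundary suffixes once and tests each no_proxy entry by set membership in a single fused loop, instead of A's per-entry equality-plus-endswith string scans over a prebuilt entries list.
import Mathlib
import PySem

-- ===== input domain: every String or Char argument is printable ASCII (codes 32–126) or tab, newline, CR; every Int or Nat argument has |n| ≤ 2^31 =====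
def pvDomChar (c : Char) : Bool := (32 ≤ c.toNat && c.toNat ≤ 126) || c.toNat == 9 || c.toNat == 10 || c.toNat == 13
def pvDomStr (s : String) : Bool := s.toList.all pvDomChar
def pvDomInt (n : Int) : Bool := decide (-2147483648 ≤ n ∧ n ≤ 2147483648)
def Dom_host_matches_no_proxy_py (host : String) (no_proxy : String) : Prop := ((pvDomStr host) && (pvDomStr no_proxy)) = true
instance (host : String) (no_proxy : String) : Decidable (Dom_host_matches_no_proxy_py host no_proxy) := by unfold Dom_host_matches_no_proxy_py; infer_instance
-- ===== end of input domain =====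

-- B replaces A's per-entry endswith scans with a precomputed set of the host's dot-boundary suffixes
-- looked up per entry in one fused loop (alternative structure; return values proved equal).

-- ===== PORT A =====
-- the for-loop over entries with early returns
def pvLoopA (hl : List Char) : List (List Char) → Bool
  | [] => false
  | e :: rest =>
    if e = ['*'] then true
    else if hl = e then true
    else if PySem.Chars.endswith hl ('.' :: e) then true
    else pvLoopA hl rest

def host_matches_no_proxy_py (host : String) (no_proxy : String) : Bool :=
  let entries := (PySem.Chars.splitOn no_proxy.toList [',']).filterMap
    (fun item => if PySem.Chars.strip item ≠ [] then some (PySem.Chars.lower (PySem.Chars.strip item)) else none)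
  let host_lower := PySem.Chars.lower host.toList
  pvLoopA host_lower entries

-- ===== PORT B =====
-- the suffixes of hl that start right after a '.' (hl[i+1:] whenever hl[i] == '.')
def pvDotSufs : List Char → List (List Char)
  | [] => []
  | c :: rest => (if c = '.' then [rest] else []) ++ pvDotSufs rest

-- cands = {hl}; then add each dot-boundary suffix
def pvCands (hl : List Char) : PySem.Set (List Char) :=
  (pvDotSufs hl).foldl PySem.Set.add (PySem.Set.ofList [hl])

def pvLoopB (cands : PySem.Set (List Char)) : List (List Char) → Bool
  | [] => false
  | item :: rest =>
    let e := PySem.Chars.lower (PySem.Chars.strip item)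
    if e ≠ [] ∧ (e = ['*'] ∨ PySem.Set.contains cands e) then true
    else pvLoopB cands rest

def host_matches_no_proxy_py_alt (host : String) (no_proxy : String) : Bool :=
  let hl := PySem.Chars.lower host.toList
  pvLoopB (pvCands hl) (PySem.Chars.splitOn no_proxy.toList [','])

-- ===== PRECONDITION & SPEC =====
def Spec_host_matches_no_proxy_py (host : String) (no_proxy : String) (out : Bool) : Prop := out = host_matches_no_proxy_py_alt host no_proxy
instance (host : String) (no_proxy : String) (out : Bool) : Decidable (Spec_host_matches_no_proxy_py host no_proxy out) := by unfold Spec_host_matches_no_proxy_py; infer_instance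

-- ===== CLAIM (what is proved, stated in full; the proofs are below) =====
def Claim_equal_host_matches_no_proxy_py : Prop := ∀ (host : String) (no_proxy : String), Dom_host_matches_no_proxy_py host no_proxy → Spec_host_matches_no_proxy_py host no_proxy (host_matches_no_proxy_py host no_proxy)

-- ===== LEMMAS AND PROOFS =====

lemma mem_pvDotSufs (h : List Char) (e : List Char) : e ∈ pvDotSufs h ↔ ('.' :: e) <:+ h := by
  induction h with
  | nil => simp [pvDotSufs]
  | cons c rest ih =>
    simp only [pvDotSufs, List.mem_append, ih, List.suffix_cons_iff, List.cons.injEq]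
    by_cases hc : c = '.' <;> simp [hc, eq_comm]

lemma mem_pvCands (hl e : List Char) : e ∈ pvCands hl ↔ e = hl ∨ ('.' :: e) <:+ hl := by
  unfold pvCands
  rw [← PySem.Set.update]
  simp [PySem.Set.mem_update, PySem.Set.mem_ofList, mem_pvDotSufs]

lemma lower_eq_nil (s : List Char) : PySem.Chars.lower s = [] ↔ s = [] := by
  cases s <;> simp [PySem.Chars.lower]

lemma loops_agree (hl : List Char) (items : List (List Char)) :
    pvLoopA hl (items.filterMap
      (fun item => if PySem.Chars.strip item ≠ [] then some (PySem.Chars.lower (PySem.Chars.strip item)) else none))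
      = pvLoopB (pvCands hl) items := by
  induction items with
  | nil => simp [pvLoopA, pvLoopB]
  | cons item rest ih =>
    simp only [List.filterMap_cons]
    set e := PySem.Chars.lower (PySem.Chars.strip item) with he
    by_cases hs : PySem.Chars.strip item ≠ []
    · have hne : e ≠ [] := fun h => hs ((lower_eq_nil _).mp (he ▸ h))
      have hcontains : PySem.Set.contains (pvCands hl) e = true ↔ (hl = e ∨ ('.' :: e) <:+ hl) := by
        rw [PySem.Set.contains_iff, mem_pvCands]
        exact or_congr ⟨Eq.symm, Eq.symm⟩ Iff.rfl
      have hcond : (e ≠ [] ∧ (e = ['*'] ∨ PySem.Set.contains (pvCands hl) e = true)) ↔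
          (e = ['*'] ∨ hl = e ∨ PySem.Chars.endswith hl ('.' :: e) = true) := by
        rw [hcontains]
        constructor
        · rintro ⟨-, (h | h | h)⟩
          exacts [Or.inl h, Or.inr (Or.inl h), Or.inr (Or.inr ((PySem.Chars.endswith_iff _ _).mpr h))]
        · rintro (h | h | h)
          exacts [⟨hne, Or.inl h⟩, ⟨hne, Or.inr (Or.inl h)⟩,
            ⟨hne, Or.inr (Or.inr ((PySem.Chars.endswith_iff _ _).mp h))⟩]
      rw [if_pos hs]
      simp only [pvLoopA, pvLoopB]
      rw [← he]
      by_cases hA : e = ['*'] ∨ hl = e ∨ PySem.Chars.endswith hl ('.' :: e) = true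
      · rw [if_pos (hcond.mpr hA)]
        rcases hA with h | h | h <;> simp [h]
      · have h1 : ¬ e = ['*'] := fun h => hA (Or.inl h)
        have h2 : ¬ hl = e := fun h => hA (Or.inr (Or.inl h))
        have h3 : ¬ PySem.Chars.endswith hl ('.' :: e) = true := fun h => hA (Or.inr (Or.inr h))
        rw [if_neg (fun hc => hA (hcond.mp hc)), if_neg h1, if_neg h2, if_neg h3, ih]
    · rw [if_neg hs, ih]
      rw [Decidable.not_not] at hs
      have hz : e = [] := by rw [he, lower_eq_nil]; exact hs
      conv_rhs => rw [pvLoopB]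
      rw [← he]
      simp [hz]

-- ===== VERDICT (by name: the statement is the Claim_ definition above) =====
theorem host_matches_no_proxy_py_spec : Claim_equal_host_matches_no_proxy_py := by
  intro host no_proxy _
  unfold Spec_host_matches_no_proxy_py host_matches_no_proxy_py host_matches_no_proxy_py_alt
  exact loops_agree _ _
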